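-- pv_equiv track=rewrite | github.com/Raviteja3112/LogicOverSyntax_Codes | LogicOverSyntaxCodes/Searching/PythonCodes/Leetcode1482.py | canIMakeBouquet
-- ===== SOURCE A (Python) =====
-- def canIMakeBouquet(bloomDay, m, k, day):
--     bouquets = 0
--     flowers = 0
--
--     for bloom in bloomDay:
--         if bloom <= day:
--             flowers += 1
--         else:
--             flowers = 0
--
--         if flowers == k:
--             bouquets += 1
--             flowers = 0
--
--         if bouquets == m:
--             return True
--
--     return False
-- ===== SOURCE B (Python) =====
-- def canIMakeBouquet(bloomDay, m, k, day):
--     # Run-extraction rewrite: split the garden into maximal runs of bloomed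
--     # flowers and take floor(run_length / k) bouquets from each run.
--     if m <= 0:
--         return m == 0
--     if k <= 0:
--         return False
--     total = 0
--     i, n = 0, len(bloomDay)
--     while i < n:
--         if bloomDay[i] <= day:
--             j = i
--             while j < n and bloomDay[j] <= day:
--                 j += 1
--             total += (j - i) // k
--             i = j
--         else:
--             i += 1
--     return total >= m
-- ===== Notes on version B (the rewrite author's own statement) =====
-- stated objective: alternative
-- what changed: B replaces A's per-element flower counter with equality test and reset (and early return on bouquets == m) by a two-level run-extraction scan: it finds each maximal run of bloomed flowers, adds run_length // k bouquets per run, and compares the total with m at the end.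
-- outside the precondition, e.g. on canIMakeBouquet([1], 0, 1, 5): A returns False, B returns True; on canIMakeBouquet([], 0, 1, 0): A returns False, B returns True; on canIMakeBouquet([10], 1, 0, 0): A returns True, B returns False
import Mathlib
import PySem

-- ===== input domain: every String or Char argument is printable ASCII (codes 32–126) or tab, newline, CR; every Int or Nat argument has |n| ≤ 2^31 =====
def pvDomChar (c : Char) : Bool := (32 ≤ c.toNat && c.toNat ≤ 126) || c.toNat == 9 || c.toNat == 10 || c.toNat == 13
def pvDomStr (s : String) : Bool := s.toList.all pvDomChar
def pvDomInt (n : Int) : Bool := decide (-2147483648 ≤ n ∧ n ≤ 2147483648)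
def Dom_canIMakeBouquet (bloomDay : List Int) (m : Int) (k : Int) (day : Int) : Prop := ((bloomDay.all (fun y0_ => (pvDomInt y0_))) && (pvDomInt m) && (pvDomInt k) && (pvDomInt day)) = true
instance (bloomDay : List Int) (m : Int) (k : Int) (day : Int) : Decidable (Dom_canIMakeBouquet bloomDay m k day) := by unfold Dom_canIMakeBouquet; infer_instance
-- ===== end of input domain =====

-- B replaces A's per-element counter-with-reset and early return by run extraction
-- (maximal runs of bloomed flowers) with floor division per run; same O(n) cost (objective: alternative).

-- ===== PORT A =====
-- A's for-loop with early return: state (bouquets, flowers).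
def canIMakeBouquetLoop (m : Int) (k : Int) (day : Int) : List Int → Int → Int → Bool
  | [], _, _ => false
  | bloom :: rest, bouquets, flowers =>
    let flowers1 : Int := if bloom ≤ day then flowers + 1 else 0
    let st : Int × Int := if flowers1 = k then (bouquets + 1, 0) else (bouquets, flowers1)
    if st.1 = m then true else canIMakeBouquetLoop m k day rest st.1 st.2

def canIMakeBouquet (bloomDay : List Int) (m : Int) (k : Int) (day : Int) : Bool :=
  canIMakeBouquetLoop m k day bloomDay 0 0

-- ===== PORT B =====
-- Source B's outer while over the suffix bloomDay[i:]; the inner while that advances j to the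
-- end of the current run is the takeWhile/dropWhile of the suffix; total is the accumulator.
def canIMakeBouquetRuns (k : Int) (day : Int) (xs : List Int) (total : Int) : Int :=
  match xs with
  | [] => total
  | b :: rest =>
    if b ≤ day then
      canIMakeBouquetRuns k day ((b :: rest).dropWhile (fun x => decide (x ≤ day)))
        (total + PySem.Int.floordiv (((b :: rest).takeWhile (fun x => decide (x ≤ day))).length : Int) k)
    else
      canIMakeBouquetRuns k day rest total
termination_by xs.length
decreasing_by
  · rw [List.dropWhile_cons_of_pos (by simpa using ‹b ≤ day›)]
    exact Nat.lt_succ_of_le (List.length_dropWhile_le _ _)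
  · simp

def canIMakeBouquet_alt (bloomDay : List Int) (m : Int) (k : Int) (day : Int) : Bool :=
  if m ≤ 0 then decide (m = 0)
  else if k ≤ 0 then false
  else decide (canIMakeBouquetRuns k day bloomDay 0 ≥ m)

-- ===== PRECONDITION & SPEC =====
-- Pre_ excludes the degenerate corners m == 0 and k == 0 (the problem's m, k are bouquet counts/sizes ≥ 1):
-- there A still returns, but its value is an unspecifiable accident of its loop (for m == 0 it returns False
-- exactly when the first element immediately completes a bouquet; for k == 0 it counts every NON-bloomed
-- flower as a bouquet), while B naturally answers True for m == 0 and False for k == 0.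
def Pre_canIMakeBouquet (bloomDay : List Int) (m : Int) (k : Int) (day : Int) : Prop :=
  m ≠ 0 ∧ k ≠ 0
instance (bloomDay : List Int) (m : Int) (k : Int) (day : Int) : Decidable (Pre_canIMakeBouquet bloomDay m k day) := by unfold Pre_canIMakeBouquet; infer_instance

def pvWitness_canIMakeBouquet : List Int × Int × Int × Int := ([3, 1, 4, 1, 5], 2, 2, 3)

def Spec_canIMakeBouquet (bloomDay : List Int) (m : Int) (k : Int) (day : Int) (out : Bool) : Prop := out = canIMakeBouquet_alt bloomDay m k day
instance (bloomDay : List Int) (m : Int) (k : Int) (day : Int) (out : Bool) : Decidable (Spec_canIMakeBouquet bloomDay m k day out) := by unfold Spec_canIMakeBouquet; infer_instance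

-- ===== CLAIM (what is proved, stated in full; the proofs are below) =====
def Claim_equal_canIMakeBouquet : Prop := ∀ (bloomDay : List Int) (m : Int) (k : Int) (day : Int), Dom_canIMakeBouquet bloomDay m k day → Pre_canIMakeBouquet bloomDay m k day → Spec_canIMakeBouquet bloomDay m k day (canIMakeBouquet bloomDay m k day)

-- ===== LEMMAS AND PROOFS =====

-- Reference count: bouquets made by A's accounting, over Nat (K = k.toNat, carry c = current run length mod K).
def cntN (K : Nat) (day : Int) : List Int → Nat → Nat
  | [], _ => 0
  | b :: rest, c =>
    if b ≤ day then (if c + 1 = K then 1 + cntN K day rest 0 else cntN K day rest (c + 1))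
    else cntN K day rest 0

-- A's loop, for m < 0, never fires (bouquets stays ≥ 0).
theorem aLoop_neg_m (m k day : Int) (hm : m < 0) :
    ∀ (xs : List Int) (bq fl : Int), 0 ≤ bq → canIMakeBouquetLoop m k day xs bq fl = false := by
  intro xs
  induction xs with
  | nil => intro bq fl _; rfl
  | cons b rest ih =>
    intro bq fl hbq
    simp only [canIMakeBouquetLoop]
    split_ifs with h1 h2 h3 <;> try exact ih _ _ (by omega)
    all_goals simp_all <;> omega

-- A's loop, for k < 0 and bq ≠ m: the flower counter never equals k, bouquets never changes.
theorem aLoop_neg_k (m k day : Int) (hk : k < 0) :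
    ∀ (xs : List Int) (bq fl : Int), 0 ≤ fl → bq ≠ m → canIMakeBouquetLoop m k day xs bq fl = false := by
  intro xs
  induction xs with
  | nil => intro bq fl _ _; rfl
  | cons b rest ih =>
    intro bq fl hfl hbq
    simp only [canIMakeBouquetLoop]
    have h1 : (if b ≤ day then fl + 1 else 0) ≠ k := by split <;> omega
    rw [if_neg h1]
    simp only [if_neg hbq]
    exact ih _ _ (by split <;> omega) hbq

-- A's loop equals "can the remaining count reach m", for k = K ≥ 1.
theorem aLoop_eq_cnt (m : Int) (K : Nat) (day : Int) (hK : 1 ≤ K) :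
    ∀ (xs : List Int) (c : Nat) (bq : Int), 0 ≤ bq → bq < m →
      canIMakeBouquetLoop m (K : Int) day xs bq (c : Int) = decide (m ≤ bq + (cntN K day xs c : Int)) := by
  intro xs
  induction xs with
  | nil => intro c bq h0 h1; simp [canIMakeBouquetLoop, cntN]; omega
  | cons b rest ih =>
    intro c bq h0 h1
    simp only [canIMakeBouquetLoop, cntN]
    by_cases hb : b ≤ day
    · simp only [if_pos hb]
      have hcast : ((c : Int) + 1 = (K : Int)) ↔ (c + 1 = K) := by exact_mod_cast Iff.rfl
      by_cases hfull : c + 1 = K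
      · rw [if_pos (hcast.mpr hfull), if_pos hfull]
        by_cases hdone : bq + 1 = m
        · simp only [hdone]
          have : (0 : Int) ≤ (cntN K day rest 0 : Int) := Int.natCast_nonneg _
          simp; omega
        · simp only [if_neg hdone]
          have := ih 0 (bq + 1) (by omega) (by omega)
          rw [show ((0:Nat) : Int) = (0:Int) from rfl] at this
          rw [this]
          simp only [decide_eq_decide]
          push_cast; omega
      · rw [if_neg (fun h => hfull (hcast.mp h)), if_neg hfull]
        simp only [if_neg (by omega : ¬ bq = m)]
        have := ih (c + 1) bq h0 h1
        rw [show ((c:Int) + 1) = ((c + 1 : Nat) : Int) by push_cast; ring]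
        exact this
    · simp only [if_neg hb]
      have hne : (0 : Int) ≠ (K : Int) := by exact_mod_cast (by omega : (0:Nat) ≠ K)
      rw [if_neg hne]
      simp only [if_neg (by omega : ¬ bq = m)]
      have := ih 0 bq h0 h1
      rw [show ((0:Nat) : Int) = (0:Int) from rfl] at this
      exact this

-- Counting through one maximal run: carry c, then a run ys of bloomed flowers, then zs
-- starting with a non-bloomed flower (or empty) yields (c + |ys|) / K bouquets plus the rest.
theorem cnt_run (K : Nat) (day : Int) (hK : 1 ≤ K) :
    ∀ (ys zs : List Int) (c : Nat), c < K → (∀ y ∈ ys, y ≤ day) →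
      (zs = [] ∨ ∃ z zs', zs = z :: zs' ∧ ¬ z ≤ day) →
      cntN K day (ys ++ zs) c = (c + ys.length) / K + cntN K day zs 0 := by
  intro ys
  induction ys with
  | nil =>
    intro zs c hc _ hz
    have hdiv : (c + 0) / K = 0 := Nat.div_eq_of_lt (by omega)
    rcases hz with h | ⟨z, zs', hzz, hgt⟩
    · subst h; simpa [cntN] using hdiv.symm
    · subst hzz
      simp only [List.nil_append, List.length_nil, hdiv, Nat.zero_add]
      simp [cntN, hgt]
  | cons y ys' ih =>
    intro zs c hc hall hz
    have hy : y ≤ day := hall y (by simp)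
    simp only [List.cons_append, cntN, if_pos hy, List.length_cons]
    by_cases hfull : c + 1 = K
    · rw [if_pos hfull, ih zs 0 (by omega) (fun a ha => hall a (by simp [ha])) hz]
      have : (c + (ys'.length + 1)) / K = (K + ys'.length) / K := by rw [show c + (ys'.length + 1) = K + ys'.length by omega]
      rw [this, Nat.add_div_left _ (by omega), Nat.zero_add]
      omega
    · rw [if_neg hfull, ih zs (c + 1) (by omega) (fun a ha => hall a (by simp [ha])) hz]
      have : c + 1 + ys'.length = c + (ys'.length + 1) := by omega
      rw [this]

-- B's run scan computes exactly the reference count (plus the accumulator), for k = K ≥ 1.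
theorem runs_eq_cnt (K : Nat) (day : Int) (hK : 1 ≤ K) :
    ∀ (xs : List Int) (t : Int),
      canIMakeBouquetRuns (K : Int) day xs t = t + (cntN K day xs 0 : Int) := by
  intro xs t
  induction xs, t using canIMakeBouquetRuns.induct (K : Int) day with
  | case1 t => simp [canIMakeBouquetRuns, cntN]
  | case2 t b rest hb ih =>
    rw [canIMakeBouquetRuns, if_pos hb]
    rw [ih]
    set p : Int → Bool := fun x => decide (x ≤ day) with hp
    have hsplit : (b :: rest).takeWhile p ++ (b :: rest).dropWhile p = b :: rest :=
      List.takeWhile_append_dropWhile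
    have hall : ∀ y ∈ (b :: rest).takeWhile p, y ≤ day := by
      intro y hy
      have := List.mem_takeWhile_imp hy
      simpa [hp] using this
    have hz : (b :: rest).dropWhile p = [] ∨
        ∃ z zs', (b :: rest).dropWhile p = z :: zs' ∧ ¬ z ≤ day := by
      cases hd : (b :: rest).dropWhile p with
      | nil => exact Or.inl rfl
      | cons z zs' =>
        refine Or.inr ⟨z, zs', rfl, ?_⟩
        have := List.head?_dropWhile_not p (b :: rest)
        rw [hd] at this
        simpa [hp] using this
    have hcnt : cntN K day (b :: rest) 0 =
        ((b :: rest).takeWhile p).length / K + cntN K day ((b :: rest).dropWhile p) 0 := by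
      conv_lhs => rw [← hsplit]
      have := cnt_run K day hK ((b :: rest).takeWhile p) ((b :: rest).dropWhile p) 0 (by omega) hall hz
      simpa using this
    rw [hcnt]
    rw [PySem.Int.floordiv_natCast]
    push_cast
    ring
  | case3 t b rest hb ih =>
    rw [canIMakeBouquetRuns, if_neg hb]
    rw [ih]
    have : cntN K day (b :: rest) 0 = cntN K day rest 0 := by simp [cntN, hb]
    rw [this]

-- ===== VERDICT (by name: the statement is the Claim_ definition above) =====
theorem canIMakeBouquet_spec : Claim_equal_canIMakeBouquet := by
  intro bloomDay m k day _ hpre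
  obtain ⟨hm, hk⟩ := hpre
  unfold Spec_canIMakeBouquet canIMakeBouquet canIMakeBouquet_alt
  by_cases hm0 : m ≤ 0
  · rw [if_pos hm0]
    rw [aLoop_neg_m m k day (by omega) bloomDay 0 0 le_rfl]
    simp [hm]
  · rw [if_neg hm0]
    by_cases hk0 : k ≤ 0
    · rw [if_pos hk0]
      exact aLoop_neg_k m k day (by omega) bloomDay 0 0 le_rfl (by omega)
    · rw [if_neg hk0]
      have hkK : k = (k.toNat : Int) := by omega
      have hK1 : 1 ≤ k.toNat := by omega
      rw [hkK]
      have hA := aLoop_eq_cnt m k.toNat day hK1 bloomDay 0 0 le_rfl (by omega)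
      have hB := runs_eq_cnt k.toNat day hK1 bloomDay 0
      simp only [Nat.cast_zero] at hA hB
      rw [hA, hB]
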